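-- pv_equiv track=rewrite | github.com/vincenzoml/UNIPI-MIM | app/src/markdown_slides_generator/core/content_splitter.py | _is_inside_inline_code
-- ===== SOURCE A (Python) =====
-- def _is_inside_inline_code(line: str, start_pos: int, end_pos: int) -> bool:
--     """Check if a position range is inside inline code (backticks)."""
--     # Find all backtick pairs in the line
--     backticks = []
--     i = 0
--     while i < len(line):
--         if line[i] == '`':
--             # Count consecutive backticks
--             tick_count = 0
--             start_tick = i
--             while i < len(line) and line[i] == '`':
--                 tick_count += 1
--                 i += 1
--             backticks.append((start_tick, i - 1, tick_count))
--         else: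
--             i += 1
--
--     # Match opening and closing backticks
--     code_spans = []
--     i = 0
--     while i < len(backticks):
--         start_tick_pos, start_tick_end, start_tick_count = backticks[i]
--         # Find matching closing backticks
--         for j in range(i + 1, len(backticks)):
--             end_tick_pos, end_tick_end, end_tick_count = backticks[j]
--             if end_tick_count == start_tick_count:
--                 # Found matching pair
--                 code_spans.append((start_tick_end + 1, end_tick_pos))
--                 i = j + 1
--                 break
--         else:
--             # No matching closing backticks found
--             i += 1
--
--     # Check if the directive position is inside any code span
--     for code_start, code_end in code_spans:
--         if code_start <= start_pos and end_pos <= code_end: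
--             return True
--
--     return False
-- ===== SOURCE B (Python) =====
-- def _is_inside_inline_code(line: str, start_pos: int, end_pos: int) -> bool:
--     """Check if a position range is inside inline code (backticks)."""
--     # Phase 1: collect runs of backticks as (start, end, count)
--     groups = []
--     i = 0
--     n = len(line)
--     while i < n:
--         if line[i] == '`':
--             j = i
--             while j < n and line[j] == '`':
--                 j += 1
--             groups.append((i, j - 1, j - i))
--             i = j
--         else:
--             i += 1
--
--     # Phase 2: next_same[i] = index of the nearest later group with the same
--     # tick count, built in one right-to-left pass with a last-seen table.
--     k = len(groups)
--     next_same = [None] * k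
--     last_index = {}
--     for idx in range(k - 1, -1, -1):
--         cnt = groups[idx][2]
--         next_same[idx] = last_index.get(cnt)
--         last_index[cnt] = idx
--
--     # Phase 3: drive the greedy pairing with the table, testing containment
--     # on the fly (early return instead of building the span list).
--     i = 0
--     while i < k:
--         j = next_same[i]
--         if j is None:
--             i += 1
--         else:
--             if groups[i][1] + 1 <= start_pos and end_pos <= groups[j][0]:
--                 return True
--             i = j + 1
--     return False
-- ===== Notes on version B (the rewrite author's own statement) =====
-- stated objective: faster
-- what changed: The nested forward re-scan that matches each opening backtick group is replaced by a next-same-count index table built in one right-to-left pass with a last-seen dict, and the span list is dropped in favour of an on-the-fly containment check with early return.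
import Mathlib
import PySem

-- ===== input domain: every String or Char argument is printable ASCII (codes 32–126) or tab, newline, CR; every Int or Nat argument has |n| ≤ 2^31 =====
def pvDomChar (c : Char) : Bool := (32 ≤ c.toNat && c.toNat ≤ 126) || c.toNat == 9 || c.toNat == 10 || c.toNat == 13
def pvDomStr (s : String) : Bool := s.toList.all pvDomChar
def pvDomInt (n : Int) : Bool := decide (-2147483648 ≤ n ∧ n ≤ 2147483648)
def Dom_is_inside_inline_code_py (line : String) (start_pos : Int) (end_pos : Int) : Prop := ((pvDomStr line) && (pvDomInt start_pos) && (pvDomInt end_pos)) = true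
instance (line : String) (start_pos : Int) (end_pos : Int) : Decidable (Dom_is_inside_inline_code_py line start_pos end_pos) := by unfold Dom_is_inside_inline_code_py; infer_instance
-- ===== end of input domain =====

-- B replaces A's nested forward re-scan for a matching backtick group by a
-- next-same-count index table built in one right-to-left pass and an
-- early-return containment check (O(k) matching instead of O(k^2); the
-- timing run measured B faster on the generated inputs).

-- ===== PORT A =====
-- number of leading backticks (A's inner `while line[i] == '`'` counting loop)
def pvTicks (cs : List Char) : Nat := (cs.takeWhile (· = '`')).length

-- A's first while loop: collect runs of backticks as (start, end, count)
def pvScanA : List Char → Nat → List (Nat × Nat × Nat)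
  | [], _ => []
  | c :: rest, i =>
    if c = '`' then
      (i, i + pvTicks rest, pvTicks rest + 1) :: pvScanA (rest.drop (pvTicks rest)) (i + pvTicks rest + 1)
    else
      pvScanA rest (i + 1)
  termination_by cs _ => cs.length
  decreasing_by all_goals simp

-- A's inner `for j in range(i+1, len(backticks))` scan: first later group with
-- the same count, together with the groups after it (i = j + 1)
def pvFindSplit : List (Nat × Nat × Nat) → Nat → Option ((Nat × Nat × Nat) × List (Nat × Nat × Nat))
  | [], _ => none
  | g :: rest, c => if g.2.2 = c then some (g, rest) else pvFindSplit rest c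

theorem pvFindSplit_length (l : List (Nat × Nat × Nat)) (c : Nat)
    (g : Nat × Nat × Nat) (t : List (Nat × Nat × Nat))
    (h : pvFindSplit l c = some (g, t)) : t.length < l.length := by
  induction l with
  | nil => simp [pvFindSplit] at h
  | cons a rest ih =>
    simp only [pvFindSplit] at h
    split at h
    · cases h; simp
    · have := ih h; simp; omega

-- A's second while loop: build the list of code spans
def pvMatchA : List (Nat × Nat × Nat) → List (Nat × Nat)
  | [] => []
  | g :: rest =>
    match h : pvFindSplit rest g.2.2 with
    | some (h', t) => (g.2.1 + 1, h'.1) :: pvMatchA t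
    | none => pvMatchA rest
  termination_by l => l.length
  decreasing_by
  · have := pvFindSplit_length rest g.2.2 h' t h; simp; omega
  · simp

def is_inside_inline_code_py (line : String) (start_pos : Int) (end_pos : Int) : Bool :=
  (pvMatchA (pvScanA line.toList 0)).any
    (fun p => decide ((p.1 : Int) ≤ start_pos) && decide (end_pos ≤ (p.2 : Int)))

-- ===== PORT B =====
-- B's first while loop (j runs to the end of the backtick run)
def pvScanB : List Char → Nat → List (Nat × Nat × Nat)
  | [], _ => []
  | c :: rest, i =>
    if c = '`' then
      (i, (i + 1 + pvTicks rest) - 1, (i + 1 + pvTicks rest) - i)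
        :: pvScanB (rest.drop (pvTicks rest)) (i + 1 + pvTicks rest)
    else
      pvScanB rest (i + 1)
  termination_by cs _ => cs.length
  decreasing_by all_goals simp

-- B's right-to-left pass: last_index dict and the next_same table (built
-- back-to-front, so the tail (higher indices) is processed first)
def pvNextAux : List (Nat × Nat × Nat) → Nat → PySem.Dict Nat Nat × List (Option Nat)
  | [], _ => (PySem.Dict.empty, [])
  | g :: rest, idx =>
    let (d, tbl) := pvNextAux rest (idx + 1)
    (d.insert g.2.2 idx, d.get? g.2.2 :: tbl)

-- B's final while loop, driven by the next_same table, early return on hit.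
-- fuel = number of groups (the index strictly increases each iteration);
-- out-of-range getD defaults are never reached (table entries are in range).
def pvDriveB (groups : List (Nat × Nat × Nat)) (tbl : List (Option Nat))
    (s e : Int) : Nat → Nat → Bool
  | 0, _ => false
  | fuel + 1, i =>
    if i < groups.length then
      match tbl.getD i none with
      | none => pvDriveB groups tbl s e fuel (i + 1)
      | some j =>
        let gi := groups.getD i (0, 0, 0)
        let gj := groups.getD j (0, 0, 0)
        if decide (((gi.2.1 + 1 : Nat) : Int) ≤ s) && decide (e ≤ ((gj.1 : Nat) : Int)) then
          true
        else
          pvDriveB groups tbl s e fuel (j + 1)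
    else false

def is_inside_inline_code_py_alt (line : String) (start_pos : Int) (end_pos : Int) : Bool :=
  let groups := pvScanB line.toList 0
  pvDriveB groups (pvNextAux groups 0).2 start_pos end_pos groups.length 0

-- ===== PRECONDITION & SPEC =====
def Spec_is_inside_inline_code_py (line : String) (start_pos : Int) (end_pos : Int) (out : Bool) : Prop := out = is_inside_inline_code_py_alt line start_pos end_pos
instance (line : String) (start_pos : Int) (end_pos : Int) (out : Bool) : Decidable (Spec_is_inside_inline_code_py line start_pos end_pos out) := by unfold Spec_is_inside_inline_code_py; infer_instance

-- ===== CLAIM (what is proved, stated in full; the proofs are below) =====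
def Claim_equal_is_inside_inline_code_py : Prop := ∀ (line : String) (start_pos : Int) (end_pos : Int), Dom_is_inside_inline_code_py line start_pos end_pos → Spec_is_inside_inline_code_py line start_pos end_pos (is_inside_inline_code_py line start_pos end_pos)

-- ===== LEMMAS AND PROOFS =====

-- the two linear scans produce the same group list
theorem pvScanB_eq (cs : List Char) (i : Nat) : pvScanB cs i = pvScanA cs i := by
  induction cs, i using pvScanA.induct with
  | case1 i => simp [pvScanA, pvScanB]
  | case2 rest i ih =>
    have e1 : i + 1 + pvTicks rest = i + pvTicks rest + 1 := by omega
    simp [pvScanA, pvScanB, e1, ih]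
    omega
  | case3 c rest i hc ih =>
    simp [pvScanA, pvScanB, hc, ih]

-- reference: the greedy pairing with the containment test done on the fly
def pvRef (s e : Int) : List (Nat × Nat × Nat) → Bool
  | [] => false
  | g :: rest =>
    match hf : pvFindSplit rest g.2.2 with
    | some (h', t) =>
      (decide (((g.2.1 + 1 : Nat) : Int) ≤ s) && decide (e ≤ ((h'.1 : Nat) : Int))) || pvRef s e t
    | none => pvRef s e rest
  termination_by l => l.length
  decreasing_by
  · have := pvFindSplit_length rest g.2.2 h' t hf; simp; omega
  · simp

-- A's build-then-check equals the on-the-fly reference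
theorem pvMatchA_any (s e : Int) (l : List (Nat × Nat × Nat)) :
    (pvMatchA l).any (fun p => decide ((p.1 : Int) ≤ s) && decide (e ≤ (p.2 : Int)))
      = pvRef s e l := by
  induction l using pvMatchA.induct with
  | case1 => simp [pvMatchA, pvRef]
  | case2 g rest h' t h ih =>
    rw [pvMatchA, pvRef]; rw [h]; simp [ih]
  | case3 g rest h ih =>
    rw [pvMatchA, pvRef]; rw [h]; exact ih

-- spec of the last_index dict: first index ≥ idx in l with the given count
def pvFirstIdx : List (Nat × Nat × Nat) → Nat → Nat → Option Nat
  | [], _, _ => none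
  | g :: rest, idx, c => if g.2.2 = c then some idx else pvFirstIdx rest (idx + 1) c

theorem pvNextAux_dict (l : List (Nat × Nat × Nat)) (idx c : Nat) :
    (pvNextAux l idx).1.get? c = pvFirstIdx l idx c := by
  induction l generalizing idx with
  | nil => simp [pvNextAux, pvFirstIdx, PySem.Dict.get?_empty]
  | cons g rest ih =>
    simp only [pvNextAux, pvFirstIdx]
    rw [PySem.Dict.get?_insert]
    by_cases h : g.2.2 = c
    · simp [h]
    · simp [h, Ne.symm h, ih]

theorem pvNextAux_tbl (l : List (Nat × Nat × Nat)) (idx i : Nat) (hi : i < l.length) :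
    (pvNextAux l idx).2.getD i none
      = pvFirstIdx (l.drop (i + 1)) (idx + i + 1) (l.getD i (0, 0, 0)).2.2 := by
  induction l generalizing idx i with
  | nil => simp at hi
  | cons g rest ih =>
    cases i with
    | zero =>
      simp only [pvNextAux, List.getD, List.drop_succ_cons, List.drop_zero]
      simp [pvNextAux_dict]
    | succ i =>
      simp only [pvNextAux]
      have hi' : i < rest.length := by simp at hi; omega
      have := ih (idx + 1) i hi'
      simp only [List.getD_cons_succ, List.drop_succ_cons]
      rw [this]
      congr 1
      omega

-- pvFirstIdx determines pvFindSplit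
theorem pvFirstIdx_none (rest : List (Nat × Nat × Nat)) (m c : Nat)
    (h : pvFirstIdx rest m c = none) : pvFindSplit rest c = none := by
  induction rest generalizing m with
  | nil => simp [pvFindSplit]
  | cons g t ih =>
    simp only [pvFirstIdx] at h
    split at h
    · exact absurd h (by simp)
    · simp only [pvFindSplit]; rw [if_neg (by assumption)]; exact ih (m + 1) h

theorem pvFirstIdx_some (rest : List (Nat × Nat × Nat)) (m c j : Nat)
    (h : pvFirstIdx rest m c = some j) :
    m ≤ j ∧ j - m < rest.length ∧
      pvFindSplit rest c = some (rest.getD (j - m) (0, 0, 0), rest.drop (j - m + 1)) := by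
  induction rest generalizing m with
  | nil => simp [pvFirstIdx] at h
  | cons g t ih =>
    simp only [pvFirstIdx] at h
    split at h
    · cases h
      refine ⟨le_refl _, by simp, ?_⟩
      simp only [pvFindSplit]; rw [if_pos (by assumption)]
      simp
    · obtain ⟨h1, h2, h3⟩ := ih (m + 1) h
      have hk : j - m = (j - (m + 1)) + 1 := by omega
      refine ⟨by omega, by simp; omega, ?_⟩
      simp only [pvFindSplit]; rw [if_neg (by assumption)]
      rw [hk, List.getD_cons_succ, List.drop_succ_cons]
      exact h3

-- the table-driven loop computes the reference on the remaining suffix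
theorem pvDriveB_eq (groups : List (Nat × Nat × Nat)) (s e : Int)
    (fuel i : Nat) (hf : groups.length - i ≤ fuel) :
    pvDriveB groups (pvNextAux groups 0).2 s e fuel i = pvRef s e (groups.drop i) := by
  induction fuel generalizing i with
  | zero =>
    have : groups.length ≤ i := by omega
    simp [pvDriveB, List.drop_of_length_le this, pvRef]
  | succ fuel ih =>
    by_cases hi : i < groups.length
    · have hdrop : groups.drop i = groups[i] :: groups.drop (i + 1) :=
        List.drop_eq_getElem_cons hi
      have hgetD : groups.getD i (0, 0, 0) = groups[i] := List.getD_eq_getElem _ _ hi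
      rw [pvDriveB, if_pos hi, pvNextAux_tbl groups 0 i hi]
      rw [hdrop, pvRef]
      have h1 : (0 : Nat) + i + 1 = i + 1 := by omega
      rw [h1, hgetD]
      cases hfi : pvFirstIdx (groups.drop (i + 1)) (i + 1) groups[i].2.2 with
      | none =>
        rw [pvFirstIdx_none _ _ _ hfi]
        exact ih (i + 1) (by omega)
      | some j =>
        obtain ⟨hj1, hj2, hj3⟩ := pvFirstIdx_some _ _ _ _ hfi
        rw [hj3]
        have hlen : (groups.drop (i + 1)).length = groups.length - (i + 1) := by simp
        have hjlt : j < groups.length := by omega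
        have hgj : (groups.drop (i + 1)).getD (j - (i + 1)) (0, 0, 0) = groups.getD j (0, 0, 0) := by
          rw [List.getD_eq_getElem _ _ (by omega), List.getD_eq_getElem _ _ hjlt]
          rw [List.getElem_drop]
          congr 1; omega
      -- (drop (i+1)).drop (j-(i+1)+1) = drop (j+1)
        have hdd : (groups.drop (i + 1)).drop (j - (i + 1) + 1) = groups.drop (j + 1) := by
          rw [List.drop_drop]
          congr 1; omega
        have hgdj : groups.getD j (0, 0, 0) = groups[j] := List.getD_eq_getElem _ _ hjlt
        simp only [hgj, hdd, hgdj, ih (j + 1) (by omega : groups.length - (j + 1) ≤ fuel)]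
        by_cases hC : (decide (((groups[i].2.1 + 1 : Nat) : Int) ≤ s)
            && decide (e ≤ ((groups[j].1 : Nat) : Int))) = true
        · rw [if_pos hC, hC, Bool.true_or]
        · rw [if_neg hC]
          rw [Bool.not_eq_true] at hC
          rw [hC, Bool.false_or]
    · rw [pvDriveB, if_neg hi]
      rw [List.drop_of_length_le (by omega), pvRef]

-- ===== VERDICT (by name: the statement is the Claim_ definition above) =====
theorem is_inside_inline_code_py_spec : Claim_equal_is_inside_inline_code_py := by
  intro line s e _
  unfold Spec_is_inside_inline_code_py is_inside_inline_code_py is_inside_inline_code_py_alt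
  rw [pvMatchA_any, pvScanB_eq,
    pvDriveB_eq (pvScanA line.toList 0) s e (pvScanA line.toList 0).length 0 (by omega)]
  simp
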